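-- pv_equiv track=rewrite | github.com/trubinart/course_python_basic | les_3_task_4.py | my_func_2
-- ===== SOURCE A (Python) =====
-- def my_func_2 (x, y):
--     y = abs(y)
--     result_2 = 0
--     for i in range (0, y):
--         result = x * x
--         result_2 = result_2 + result
--         i += 1
--     return result_2
-- ===== SOURCE B (Python) =====
-- def my_func_2(x, y):
--     return x * x * abs(y)
-- ===== Notes on version B (the rewrite author's own statement) =====
-- stated objective: faster
-- what changed: Replaces the O(|y|) loop that adds x*x abs(y) times with the closed form x*x*abs(y).
import Mathlib
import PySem

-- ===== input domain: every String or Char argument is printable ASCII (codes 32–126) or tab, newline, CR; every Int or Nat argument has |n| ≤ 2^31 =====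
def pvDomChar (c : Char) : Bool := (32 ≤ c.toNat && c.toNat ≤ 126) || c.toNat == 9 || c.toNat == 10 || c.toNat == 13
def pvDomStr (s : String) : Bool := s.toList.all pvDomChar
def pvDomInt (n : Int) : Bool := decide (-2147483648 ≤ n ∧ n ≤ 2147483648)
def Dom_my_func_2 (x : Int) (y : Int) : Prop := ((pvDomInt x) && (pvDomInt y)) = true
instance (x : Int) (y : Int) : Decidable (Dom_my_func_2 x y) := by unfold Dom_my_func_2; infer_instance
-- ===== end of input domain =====

-- B replaces A's loop (add x*x, abs(y) times) with the closed form x*x*abs(y): O(1) instead of O(|y|).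

-- ===== PORT A =====
-- loop 'for i in range(0, abs(y)): result = x*x; result_2 += result' as a fold over the range
def my_func_2 (x : Int) (y : Int) : Int :=
  let y' := |y|
  (PySem.List.pyRange 0 y' 1).foldl (fun result_2 _ => result_2 + x * x) 0

-- ===== PORT B =====
def my_func_2_alt (x : Int) (y : Int) : Int := x * x * |y|

-- ===== PRECONDITION & SPEC =====
def Spec_my_func_2 (x : Int) (y : Int) (out : Int) : Prop := out = my_func_2_alt x y
instance (x : Int) (y : Int) (out : Int) : Decidable (Spec_my_func_2 x y out) := by unfold Spec_my_func_2; infer_instance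

-- ===== CLAIM (what is proved, stated in full; the proofs are below) =====
def Claim_equal_my_func_2 : Prop := ∀ (x : Int) (y : Int), Dom_my_func_2 x y → Spec_my_func_2 x y (my_func_2 x y)

-- ===== LEMMAS AND PROOFS =====
theorem foldl_add_const (c a : Int) (l : List Int) :
    l.foldl (fun r _ => r + c) a = a + l.length * c := by
  induction l generalizing a with
  | nil => simp
  | cons h t ih => simp [List.foldl, ih]; ring

-- ===== VERDICT (by name: the statement is the Claim_ definition above) =====
theorem my_func_2_spec : Claim_equal_my_func_2 := by
  intro x y _
  unfold Spec_my_func_2 my_func_2 my_func_2_alt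
  rw [foldl_add_const]
  rw [PySem.List.length_pyRange_one]
  have : ((|y| : Int) - 0).toNat = (|y| : Int).toNat := by ring_nf
  rw [this, Int.toNat_of_nonneg (abs_nonneg y)]
  ring
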